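-- pv_equiv track=rewrite | github.com/kaldi-asr/kaldi | scripts/rnnlm/compute_sentence_scores_pytorch.py | get_input_and_target
-- ===== SOURCE A (Python) =====
-- def get_input_and_target(hyp, vocab):
--     """Given a word hypothesis, convert it to integers as input and target.
--     Assume beginning and end sentence symbols are both <eos> and the symbol for
--     unknow words is <unk>. Match these with your preprocessings."""
--
--     assert len(hyp) == 1
--     input_string = '<eos> ' + hyp[0]
--     output_string = hyp[0] + ' <eos>'
--     input_ids, output_ids = [], []
--     for word in input_string.split():
--         try:
--             input_ids.append(vocab[word.lower()])
--         except KeyError: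
--             input_ids.append(vocab['<unk>'])
--     for word in output_string.split():
--         try:
--             output_ids.append(vocab[word.lower()])
--         except KeyError:
--             output_ids.append(vocab['<unk>'])
--     return input_ids, output_ids
-- ===== SOURCE B (Python) =====
-- def get_input_and_target(hyp, vocab):
--     """Given a word hypothesis, convert it to integers as input and target.
--     Assume beginning and end sentence symbols are both <eos> and the symbol for
--     unknow words is <unk>. Match these with your preprocessings."""
--
--     assert len(hyp) == 1
--
--     def look(w):
--         return vocab[w] if w in vocab else vocab['<unk>']
--
--     core = [look(w.lower()) for w in hyp[0].split()]
--     eos = look('<eos>')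
--     return [eos] + core, core + [eos]
-- ===== Notes on version B (the rewrite author's own statement) =====
-- stated objective: simpler
-- what changed: Instead of building two padded strings and running two separate split-and-convert loops, B converts the sentence once into a shared id list and places the single <eos> id at the front (input) or back (target).
import Mathlib
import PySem

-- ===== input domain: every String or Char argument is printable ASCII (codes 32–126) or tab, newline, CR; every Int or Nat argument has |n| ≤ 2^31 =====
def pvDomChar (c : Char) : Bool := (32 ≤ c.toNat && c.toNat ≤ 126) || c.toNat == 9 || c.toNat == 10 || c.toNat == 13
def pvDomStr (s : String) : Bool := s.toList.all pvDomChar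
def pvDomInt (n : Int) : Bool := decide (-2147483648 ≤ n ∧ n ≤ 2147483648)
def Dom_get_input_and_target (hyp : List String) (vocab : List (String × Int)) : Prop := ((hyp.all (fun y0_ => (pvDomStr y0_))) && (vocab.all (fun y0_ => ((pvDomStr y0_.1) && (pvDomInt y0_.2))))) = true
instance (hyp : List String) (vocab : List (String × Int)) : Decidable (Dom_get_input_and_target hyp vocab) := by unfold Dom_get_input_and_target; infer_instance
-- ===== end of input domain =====

-- B computes the shared word-id list once and puts the single <eos> id in front (input) /
-- behind (target), instead of A's two padded strings with two separate split-and-convert loops.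

-- ===== PORT A =====
-- vocab[word] with the 'except KeyError: append(vocab['<unk>'])' fallback; the .getD 0 default
-- is only reached where the Python raises KeyError on '<unk>' too (excluded by Pre_).
def pvVocabGetA (vocab : List (String × Int)) (w : String) : Int :=
  match PySem.Dict.get? (PySem.Dict.mk vocab) w with
  | some v => v
  | none => (PySem.Dict.get? (PySem.Dict.mk vocab) "<unk>").getD 0

def get_input_and_target (hyp : List String) (vocab : List (String × Int)) : List Int × List Int :=
  -- assert len(hyp) == 1: AssertionError excluded by Pre_; the .getD "" default is unreachable under Pre_
  let s : String := (PySem.List.pyGet? hyp 0).getD ""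
  let input_string := "<eos> " ++ s
  let output_string := s ++ " <eos>"
  let input_ids := (PySem.Str.split₀ input_string).foldl
    (fun acc word => acc ++ [pvVocabGetA vocab (PySem.Str.lower word)]) []
  let output_ids := (PySem.Str.split₀ output_string).foldl
    (fun acc word => acc ++ [pvVocabGetA vocab (PySem.Str.lower word)]) []
  (input_ids, output_ids)

-- ===== PORT B =====
-- look(w) = vocab[w] if w in vocab else vocab['<unk>']; .getD 0 only where the Python raises (outside Pre_)
def pvVocabGetB (vocab : List (String × Int)) (w : String) : Int :=
  if PySem.Dict.contains (PySem.Dict.mk vocab) w then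
    (PySem.Dict.get? (PySem.Dict.mk vocab) w).getD 0
  else
    (PySem.Dict.get? (PySem.Dict.mk vocab) "<unk>").getD 0

def get_input_and_target_alt (hyp : List String) (vocab : List (String × Int)) : List Int × List Int :=
  let s : String := (PySem.List.pyGet? hyp 0).getD ""
  let core := (PySem.Str.split₀ s).map (fun w => pvVocabGetB vocab (PySem.Str.lower w))
  let eos := pvVocabGetB vocab "<eos>"
  (eos :: core, core ++ [eos])

-- ===== PRECONDITION & SPEC =====
-- Pre_ excludes exactly the inputs where the Python A raises: len(hyp) != 1 (AssertionError), or
-- some looked-up word (including '<eos>') is missing from vocab while '<unk>' is missing too (KeyError).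
def Pre_get_input_and_target (hyp : List String) (vocab : List (String × Int)) : Prop :=
  hyp.length = 1 ∧
  ((PySem.Dict.get? (PySem.Dict.mk vocab) "<unk>").isSome = true ∨
   ((PySem.Dict.get? (PySem.Dict.mk vocab) "<eos>").isSome = true ∧
    ∀ w ∈ PySem.Str.split₀ (hyp.headD ""),
      (PySem.Dict.get? (PySem.Dict.mk vocab) (PySem.Str.lower w)).isSome = true))
instance (hyp : List String) (vocab : List (String × Int)) : Decidable (Pre_get_input_and_target hyp vocab) := by
  unfold Pre_get_input_and_target; infer_instance

def pvWitness_get_input_and_target : List String × (List (String × Int)) :=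
  (["Hello world"], [("<unk>", 0), ("hello", 7), ("<eos>", 2)])

def Spec_get_input_and_target (hyp : List String) (vocab : List (String × Int)) (out : List Int × List Int) : Prop := out = get_input_and_target_alt hyp vocab
instance (hyp : List String) (vocab : List (String × Int)) (out : List Int × List Int) : Decidable (Spec_get_input_and_target hyp vocab out) := by unfold Spec_get_input_and_target; infer_instance

-- ===== CLAIM (what is proved, stated in full; the proofs are below) =====
def Claim_equal_get_input_and_target : Prop := ∀ (hyp : List String) (vocab : List (String × Int)), Dom_get_input_and_target hyp vocab → Pre_get_input_and_target hyp vocab → Spec_get_input_and_target hyp vocab (get_input_and_target hyp vocab)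

-- ===== LEMMAS AND PROOFS =====

-- the two lookup helpers compute the same value
lemma pvVocabGet_eq (vocab : List (String × Int)) (w : String) :
    pvVocabGetA vocab w = pvVocabGetB vocab w := by
  unfold pvVocabGetA pvVocabGetB
  rw [PySem.Dict.contains_eq_isSome_get?]
  cases PySem.Dict.get? (PySem.Dict.mk vocab) w <;> simp


-- split₀.go ignores its accumulator up to prepending it reversed
lemma go_acc (s : List Char) (cur : List Char) (acc : List (List Char)) :
    PySem.Chars.split₀.go s cur acc = acc.reverse ++ PySem.Chars.split₀.go s cur [] := by
  induction s generalizing cur acc with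
  | nil => simp [PySem.Chars.split₀.go]; split_ifs <;> simp
  | cons c rest ih =>
    simp only [PySem.Chars.split₀.go]
    split_ifs with h1 h2
    · exact ih [] acc
    · rw [ih [] (cur.reverse :: acc), ih [] [cur.reverse]]; simp
    · exact ih (c :: cur) acc

-- appending ' <eos>' appends one extra word to the split
lemma go_suffix (s : List Char) (cur : List Char) :
    PySem.Chars.split₀.go (s ++ (' ' :: "<eos>".toList)) cur [] =
      PySem.Chars.split₀.go s cur [] ++ ["<eos>".toList] := by
  induction s generalizing cur with
  | nil =>
    have hw : PySem.Chars.split₀.go "<eos>".toList [] [] = ["<eos>".toList] := by decide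
    have hsp : PySem.Chars.isspace ' ' = true := by decide
    simp only [List.nil_append, PySem.Chars.split₀.go, hsp, if_true]
    by_cases h : cur.isEmpty
    · simp only [h, if_true, List.reverse_nil, List.nil_append]; rw [hw]
    · rw [go_acc _ _ [cur.reverse]]; simp only [h, hw]; simp
  | cons c rest ih =>
    simp only [List.cons_append, PySem.Chars.split₀.go]
    split_ifs with h1 h2
    · exact ih []
    · rw [go_acc, ih [], go_acc rest [] [cur.reverse]]; simp
    · exact ih (c :: cur)

lemma split_prefix (s : List Char) :
    PySem.Chars.split₀ ("<eos> ".toList ++ s) = "<eos>".toList :: PySem.Chars.split₀ s := by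
  have h : PySem.Chars.split₀ ("<eos> ".toList ++ s) =
      PySem.Chars.split₀.go s [] ["<eos>".toList] := rfl
  rw [h, go_acc]; rfl

lemma split_suffix (s : List Char) :
    PySem.Chars.split₀ (s ++ " <eos>".toList) = PySem.Chars.split₀ s ++ ["<eos>".toList] := by
  have h : (" <eos>" : String).toList = ' ' :: "<eos>".toList := rfl
  rw [h]
  exact go_suffix s []

lemma str_split_prefix (s : String) :
    PySem.Str.split₀ ("<eos> " ++ s) = "<eos>" :: PySem.Str.split₀ s := by
  unfold PySem.Str.split₀
  rw [String.toList_append, split_prefix]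
  rfl

lemma str_split_suffix (s : String) :
    PySem.Str.split₀ (s ++ " <eos>") = PySem.Str.split₀ s ++ ["<eos>"] := by
  unfold PySem.Str.split₀
  rw [String.toList_append, split_suffix]
  simp

-- ===== VERDICT (by name: the statement is the Claim_ definition above) =====
theorem get_input_and_target_spec : Claim_equal_get_input_and_target := by
  intro hyp vocab _ _
  unfold Spec_get_input_and_target get_input_and_target get_input_and_target_alt
  simp only [PySem.List.foldl_append_singleton_eq_map, str_split_prefix, str_split_suffix,
    List.map_cons, List.map_append, List.map_nil, pvVocabGet_eq]
  have : PySem.Str.lower "<eos>" = "<eos>" := by decide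
  rw [this]
  simp
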